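-- pv_equiv track=rewrite | github.com/Slangoij/PlayData_Algorithm_Study | 알고리즘 스터디 3차 코테/4.참과 거짓.py | solution
-- ===== SOURCE A (Python) =====
-- def solution(statements):
--     if sum(statements) not in range(len(statements)+1):
--         return -1
--
--     answer = 0
--     for i in range(1,len(statements)+1):
--         if statements.count(i) == i:
--             answer = i
--
--     return answer
-- ===== SOURCE B (Python) =====
-- def solution(statements):
--     if sum(statements) not in range(len(statements)+1):
--         return -1
--
--     counts = {}
--     for x in statements:
--         counts[x] = counts.get(x, 0) + 1
--
--     answer = 0
--     for v, cnt in counts.items():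
--         if v == cnt and answer < v:
--             answer = v
--     return answer
-- ===== Notes on version B (the rewrite author's own statement) =====
-- stated objective: alternative
-- what changed: B replaces A's scan over the index range 1..len with repeated list.count by one pass building a frequency dict and a pass over its distinct entries taking the max v with v == count(v).
import Mathlib
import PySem

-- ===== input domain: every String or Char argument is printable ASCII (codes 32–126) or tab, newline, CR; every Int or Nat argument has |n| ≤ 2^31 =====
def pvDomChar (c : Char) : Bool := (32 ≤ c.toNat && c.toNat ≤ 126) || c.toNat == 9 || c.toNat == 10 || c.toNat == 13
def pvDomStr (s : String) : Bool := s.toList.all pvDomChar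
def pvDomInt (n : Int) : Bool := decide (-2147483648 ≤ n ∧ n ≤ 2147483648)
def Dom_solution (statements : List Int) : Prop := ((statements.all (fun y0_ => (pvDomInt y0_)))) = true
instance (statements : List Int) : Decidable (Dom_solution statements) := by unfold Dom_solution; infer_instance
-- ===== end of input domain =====

-- B replaces A's scan of the index range 1..len with repeated list.count by a frequency
-- dict built in one pass plus a max over its distinct entries (alternative algorithm).

-- ===== PORT A =====
def solution (statements : List Int) : Int :=
  if ¬ (0 ≤ statements.sum ∧ statements.sum < (statements.length : Int) + 1) then -1
  else
    (PySem.List.pyRange 1 ((statements.length : Int) + 1) 1).foldl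
      (fun answer i => if (PySem.List.count statements i : Int) == i then i else answer) 0

-- ===== PORT B =====
def solution_alt (statements : List Int) : Int :=
  if ¬ (0 ≤ statements.sum ∧ statements.sum < (statements.length : Int) + 1) then -1
  else
    let counts : PySem.Dict Int Int :=
      statements.foldl (fun d x => d.insert x (d.getD x 0 + 1)) PySem.Dict.empty
    counts.items.foldl
      (fun answer p => if p.1 == p.2 && answer < p.1 then p.1 else answer) 0

-- ===== PRECONDITION & SPEC =====
def Spec_solution (statements : List Int) (out : Int) : Prop := out = solution_alt statements
instance (statements : List Int) (out : Int) : Decidable (Spec_solution statements out) := by unfold Spec_solution; infer_instance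

-- ===== CLAIM (what is proved, stated in full; the proofs are below) =====
def Claim_equal_solution : Prop := ∀ (statements : List Int), Dom_solution statements → Spec_solution statements (solution statements)

-- ===== LEMMAS AND PROOFS =====

-- A's loop body and B's loop body, named for the proofs.
def stepA (xs : List Int) (answer i : Int) : Int :=
  if (PySem.List.count xs i : Int) == i then i else answer

def stepB (xs : List Int) (answer k : Int) : Int :=
  if k == (xs.count k : Int) && answer < k then k else answer

-- A's fold over range(1, n+1): result is 0 or a matching value ≥ 1, and dominates every matching v ≤ n.
theorem foldA_spec (xs : List Int) (n : ℕ) :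
    ((PySem.List.pyRange 1 ((n : Int) + 1) 1).foldl (stepA xs) 0 = 0 ∨
      ((xs.count ((PySem.List.pyRange 1 ((n : Int) + 1) 1).foldl (stepA xs) 0) : Int) =
        (PySem.List.pyRange 1 ((n : Int) + 1) 1).foldl (stepA xs) 0 ∧
       1 ≤ (PySem.List.pyRange 1 ((n : Int) + 1) 1).foldl (stepA xs) 0)) ∧
    (∀ v : Int, (xs.count v : Int) = v → 1 ≤ v → v ≤ (n : Int) →
      v ≤ (PySem.List.pyRange 1 ((n : Int) + 1) 1).foldl (stepA xs) 0) := by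
  induction n with
  | zero =>
      rw [PySem.List.pyRange_one_eq_nil (by norm_num)]
      exact ⟨Or.inl rfl, fun v _ h1 h2 => by omega⟩
  | succ n ih =>
      have hb : ((n + 1 : ℕ) : Int) + 1 = ((n : Int) + 1) + 1 := by push_cast; ring
      rw [hb, PySem.List.pyRange_one_succ_right (by omega)]
      rw [List.foldl_append]
      simp only [List.foldl_cons, List.foldl_nil]
      set r := (PySem.List.pyRange 1 ((n : Int) + 1) 1).foldl (stepA xs) 0 with hr
      by_cases hmatch : (xs.count ((n : Int) + 1) : Int) = (n : Int) + 1
      · have hstep : stepA xs r ((n : Int) + 1) = (n : Int) + 1 := by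
          simp [stepA, PySem.List.count_eq, hmatch]
        rw [hstep]
        refine ⟨Or.inr ⟨hmatch, by omega⟩, fun v hv h1 h2 => ?_⟩
        push_cast at h2; omega
      · have hstep : stepA xs r ((n : Int) + 1) = r := by
          simp [stepA, PySem.List.count_eq, hmatch]
        rw [hstep]
        refine ⟨ih.1, fun v hv h1 h2 => ?_⟩
        rcases eq_or_lt_of_le h2 with h | h
        · exfalso; subst h; push_cast at hmatch hv; exact hmatch hv
        · exact ih.2 v hv h1 (by push_cast at h ⊢; omega)

-- B's fold over a list of keys: monotone, result is the init or a matching member, dominates matching members.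
theorem foldB_spec (xs : List Int) (ks : List Int) (a : Int) :
    a ≤ ks.foldl (stepB xs) a ∧
    (ks.foldl (stepB xs) a = a ∨
      (ks.foldl (stepB xs) a ∈ ks ∧ (xs.count (ks.foldl (stepB xs) a) : Int) = ks.foldl (stepB xs) a)) ∧
    (∀ v ∈ ks, (xs.count v : Int) = v → v ≤ ks.foldl (stepB xs) a) := by
  induction ks generalizing a with
  | nil => exact ⟨le_refl a, Or.inl rfl, fun v hv => absurd hv (by simp)⟩
  | cons k rest ih =>
      simp only [List.foldl_cons]
      obtain ⟨ihle, ihcase, ihall⟩ := ih (stepB xs a k)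
      by_cases hk : (xs.count k : Int) = k ∧ a < k
      · have hstep : stepB xs a k = k := by simp [stepB, hk.1, hk.2]
        rw [hstep] at ihle ihcase ihall ⊢
        refine ⟨le_of_lt (lt_of_lt_of_le hk.2 ihle), ?_, fun v hv hcv => ?_⟩
        · rcases ihcase with h | ⟨hmem, hc⟩
          · exact Or.inr ⟨by simp [h], by rw [h]; exact hk.1⟩
          · exact Or.inr ⟨List.mem_cons_of_mem _ hmem, hc⟩
        · rcases List.mem_cons.mp hv with rfl | hv
          · exact ihle
          · exact ihall v hv hcv
      · have hstep : stepB xs a k = a := by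
          simp only [stepB, Bool.and_eq_true, beq_iff_eq, decide_eq_true_eq]
          rw [if_neg]
          rintro ⟨h1, h2⟩
          exact hk ⟨h1.symm, h2⟩
        rw [hstep] at ihle ihcase ihall ⊢
        refine ⟨ihle, ?_, fun v hv hcv => ?_⟩
        · rcases ihcase with h | ⟨hmem, hc⟩
          · exact Or.inl h
          · exact Or.inr ⟨List.mem_cons_of_mem _ hmem, hc⟩
        · rcases List.mem_cons.mp hv with rfl | hv
          · rcases not_and_or.mp hk with h | h
            · exact absurd hcv h
            · exact le_trans (not_lt.mp h) ihle
          · exact ihall v hv hcv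

-- The two loops compute the same value: the maximum v with count(v) == v (0 if none).
theorem main_eq (xs : List Int) :
    (PySem.List.pyRange 1 ((xs.length : Int) + 1) 1).foldl (stepA xs) 0
      = (PySem.Set.ofList xs).foldl (stepB xs) 0 := by
  obtain ⟨hAcase, hAall⟩ := foldA_spec xs xs.length
  obtain ⟨hBle, hBcase, hBall⟩ := foldB_spec xs (PySem.Set.ofList xs) 0
  set rA := (PySem.List.pyRange 1 ((xs.length : Int) + 1) 1).foldl (stepA xs) 0 with hrA
  set rB := (PySem.Set.ofList xs).foldl (stepB xs) 0 with hrB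
  rcases hAcase with hA0 | ⟨hAc, hA1⟩
  · rcases hBcase with hB0 | ⟨hBmem, hBc⟩
    · rw [hA0, hB0]
    · have hmem : rB ∈ xs := (PySem.Set.mem_ofList _ _).mp hBmem
      have hpos : 0 < List.count rB xs := List.count_pos_iff.mpr hmem
      have h1 : 1 ≤ rB := by omega
      have hlen : rB ≤ (xs.length : Int) := by
        have := List.count_le_length (l := xs) (a := rB); omega
      have := hAall rB hBc h1 hlen
      omega
  · have hposA : 0 < List.count rA xs := by omega
    have hmemA : rA ∈ xs := List.count_pos_iff.mp hposA
    have hBge : rA ≤ rB := hBall rA ((PySem.Set.mem_ofList _ _).mpr hmemA) hAc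
    rcases hBcase with hB0 | ⟨hBmem, hBc⟩
    · omega
    · have hmem : rB ∈ xs := (PySem.Set.mem_ofList _ _).mp hBmem
      have hpos : 0 < List.count rB xs := List.count_pos_iff.mpr hmem
      have h1B : 1 ≤ rB := by omega
      have hlenB : rB ≤ (xs.length : Int) := by
        have := List.count_le_length (l := xs) (a := rB); omega
      have hAge : rB ≤ rA := hAall rB hBc h1B hlenB
      omega

-- ===== VERDICT (by name: the statement is the Claim_ definition above) =====
theorem solution_spec : Claim_equal_solution := by
  intro xs _
  unfold Spec_solution solution solution_alt
  by_cases hguard : ¬ (0 ≤ xs.sum ∧ xs.sum < (xs.length : Int) + 1)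
  · rw [if_pos hguard, if_pos hguard]
  · rw [if_neg hguard, if_neg hguard]
    have hcounter : xs.foldl (fun d x => d.insert x (d.getD x 0 + 1)) PySem.Dict.empty
        = PySem.Dict.counter xs := PySem.Dict.foldl_insert_getD_add_one_eq_counter xs
    simp only [hcounter, PySem.Dict.items_counter, List.foldl_map]
    exact main_eq xs
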